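-- pv_equiv track=rewrite | github.com/rachelic44/GCN_Prediction_Transitions | GCN/gcn_dblp.py | create_tag_list_by_year
-- ===== SOURCE A (Python) =====
-- def create_tag_list_by_year(count_label, nodes_id):
--     l = []
--     years = sorted(list(count_label.keys()))
--     for year in years:
--         y = []
--         for id in nodes_id:
--             if id not in count_label[year]:
--                 y.append(-1)
--             else:
--                 y.append(count_label[year][id])
--         l.append(y)
--     return l
-- ===== SOURCE B (Python) =====
-- def create_tag_list_by_year(count_label, nodes_id):
--     pos = {}
--     for i, node in enumerate(nodes_id):
--         pos.setdefault(node, []).append(i)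
--     n = len(nodes_id)
--     result = []
--     for year in sorted(count_label):
--         row = [-1] * n
--         for id, v in count_label[year].items():
--             for i in pos.get(id, []):
--                 row[i] = v
--         result.append(row)
--     return result
-- ===== Notes on version B (the rewrite author's own statement) =====
-- stated objective: alternative
-- what changed: Instead of probing each year's dict for every node id cell by cell, B precomputes a node-id-to-positions index once and, per year, scatters only the labels present in that year into a [-1]-initialised row.
import Mathlib
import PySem

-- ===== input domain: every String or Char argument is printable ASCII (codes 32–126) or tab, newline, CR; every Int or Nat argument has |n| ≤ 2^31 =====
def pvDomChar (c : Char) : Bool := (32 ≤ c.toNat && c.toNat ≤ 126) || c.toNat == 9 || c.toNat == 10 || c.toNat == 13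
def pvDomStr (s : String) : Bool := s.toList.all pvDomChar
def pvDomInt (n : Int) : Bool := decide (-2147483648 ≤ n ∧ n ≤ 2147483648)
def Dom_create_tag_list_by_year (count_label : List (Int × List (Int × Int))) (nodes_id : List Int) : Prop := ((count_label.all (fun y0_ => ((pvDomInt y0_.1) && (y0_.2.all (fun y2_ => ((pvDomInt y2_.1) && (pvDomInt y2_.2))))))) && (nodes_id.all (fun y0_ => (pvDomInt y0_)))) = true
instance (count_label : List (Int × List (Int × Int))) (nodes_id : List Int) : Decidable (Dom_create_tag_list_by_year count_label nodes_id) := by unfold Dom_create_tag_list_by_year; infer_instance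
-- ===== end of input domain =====

-- B replaces A's per-cell membership probe by a node-id→positions index and a scatter of each
-- year's present labels into a [-1]-initialised row (objective: alternative decomposition).

-- ===== PORT A =====
-- count_label[year]: first-match lookup of the year's inner dict (the [] default is never
-- reached by A, which only looks up years taken from count_label's own keys).
def pvYearDict (count_label : List (Int × List (Int × Int))) (year : Int) : List (Int × Int) :=
  ((count_label.find? (fun p => p.1 == year)).map (·.2)).getD []

-- count_label[year][id]: first-match lookup; A evaluates it only under the guard
-- 'id in count_label[year]', so the -1 default is never reached by A.
def pvLookup (d : List (Int × Int)) (k : Int) : Int :=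
  ((d.find? (fun p => p.1 == k)).map (·.2)).getD (-1)

def create_tag_list_by_year (count_label : List (Int × List (Int × Int))) (nodes_id : List Int) : List (List Int) :=
  let years := PySem.List.sorted (count_label.map (·.1)) id
  years.foldl (fun l year =>
    let d := pvYearDict count_label year
    let y := nodes_id.foldl (fun y id =>
      if !((d.map (·.1)).contains id) then y ++ [(-1 : Int)]
      else y ++ [pvLookup d id]) []
    l ++ [y]) []

-- ===== PORT B =====
-- pos: node id → list of its positions in nodes_id (the setdefault/append loop of Source B)
def pvPosIndex (nodes_id : List Int) : PySem.Dict Int (List Int) :=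
  (PySem.List.enumerate nodes_id).foldl (fun d p => d.modify p.2 [] (· ++ [p.1])) PySem.Dict.empty

def create_tag_list_by_year_alt (count_label : List (Int × List (Int × Int))) (nodes_id : List Int) : List (List Int) :=
  let pos := pvPosIndex nodes_id
  let n := nodes_id.length
  let years := PySem.List.sorted (count_label.map (·.1)) id
  years.foldl (fun result year =>
    let d := pvYearDict count_label year
    let row := d.foldl (fun row p =>
      (pos.getD p.1 []).foldl (fun r i => PySem.List.pySetD r i p.2) row)
      (List.replicate n (-1 : Int))
    result ++ [row]) []

-- ===== PRECONDITION & SPEC =====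
-- Pre_ restricts to dict-shaped association lists: no inner list carries a duplicate id key.
-- A's parameter is a Python dict of dicts, whose inner key lists are always duplicate-free,
-- so this excludes no input the Python A ever receives (A's first-match and B's last-write
-- reading of the inner lists would differ only on such non-dict lists).
def Pre_create_tag_list_by_year (count_label : List (Int × List (Int × Int))) (_nodes_id : List Int) : Prop :=
  ∀ p ∈ count_label, (p.2.map (·.1)).Nodup
instance (count_label : List (Int × List (Int × Int))) (nodes_id : List Int) : Decidable (Pre_create_tag_list_by_year count_label nodes_id) := by unfold Pre_create_tag_list_by_year; infer_instance

def pvWitness_create_tag_list_by_year : (List (Int × List (Int × Int))) × List Int :=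
  ([(2020, [(1, 3), (2, 5)]), (2019, [(2, 7)])], [1, 2, 1, 4])

def Spec_create_tag_list_by_year (count_label : List (Int × List (Int × Int))) (nodes_id : List Int) (out : List (List Int)) : Prop := out = create_tag_list_by_year_alt count_label nodes_id
instance (count_label : List (Int × List (Int × Int))) (nodes_id : List Int) (out : List (List Int)) : Decidable (Spec_create_tag_list_by_year count_label nodes_id out) := by unfold Spec_create_tag_list_by_year; infer_instance

-- ===== CLAIM (what is proved, stated in full; the proofs are below) =====
def Claim_equal_create_tag_list_by_year : Prop := ∀ (count_label : List (Int × List (Int × Int))) (nodes_id : List Int), Dom_create_tag_list_by_year count_label nodes_id → Pre_create_tag_list_by_year count_label nodes_id → Spec_create_tag_list_by_year count_label nodes_id (create_tag_list_by_year count_label nodes_id)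

-- ===== LEMMAS AND PROOFS =====

-- membership in the filtered enumeration: x is a (shifted) index of id in ns
theorem pv_mem_enum_filter (ns : List Int) (id : Int) (s x : Int) :
    x ∈ ((PySem.List.enumerate ns s).filter (fun p => p.2 == id)).map (·.1)
      ↔ ∃ k : Nat, ∃ _ : k < ns.length, x = s + k ∧ ns[k] = id := by
  induction ns generalizing s with
  | nil => simp [PySem.List.enumerate]
  | cons a ns ih =>
    rw [PySem.List.enumerate_cons]
    simp only [List.filter_cons]
    by_cases ha : a = id
    · simp only [ha, beq_self_eq_true, if_pos, List.map_cons, List.mem_cons, ih]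
      constructor
      · rintro (rfl | ⟨k, hk, rfl, hik⟩)
        · exact ⟨0, by simp, by simp, by simp⟩
        · exact ⟨k + 1, by simpa using Nat.succ_lt_succ hk, by push_cast; ring, by simpa using hik⟩
      · rintro ⟨k, hk, rfl, hik⟩
        cases k with
        | zero => left; simp
        | succ m =>
          right
          exact ⟨m, by simpa using Nat.lt_of_succ_lt_succ hk, by push_cast; ring, by simpa using hik⟩
    · rw [if_neg (by simpa using ha)]
      rw [ih]
      constructor
      · rintro ⟨k, hk, rfl, hik⟩
        exact ⟨k + 1, by simpa using Nat.succ_lt_succ hk, by push_cast; ring, by simpa using hik⟩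
      · rintro ⟨k, hk, rfl, hik⟩
        cases k with
        | zero => exact absurd (by simpa using hik) ha
        | succ m =>
          exact ⟨m, by simpa using Nat.lt_of_succ_lt_succ hk, by push_cast; ring, by simpa using hik⟩

-- the position list of id in the index: exactly the indices of id in nodes_id
theorem pvPosIndex_getD (nodes_id : List Int) (id : Int) :
    (pvPosIndex nodes_id).getD id [] =
      ((PySem.List.enumerate nodes_id).filter (fun p => p.2 == id)).map (·.1) := by
  have h1 : pvPosIndex nodes_id
      = ((PySem.List.enumerate nodes_id).map (fun p => (p.2, p.1))).foldl
          (fun d p => d.modify p.1 [] (· ++ [p.2])) PySem.Dict.empty := by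
    rw [List.foldl_map]; rfl
  rw [h1, PySem.Dict.getD_foldl_modify_append]
  simp [List.filter_map, List.map_map, Function.comp_def]

theorem pv_mem_posIndex (ns : List Int) (id : Int) (j : Nat) (hj : j < ns.length) :
    ((j : Int) ∈ (pvPosIndex ns).getD id [] ↔ ns[j] = id) := by
  rw [pvPosIndex_getD, pv_mem_enum_filter]
  constructor
  · rintro ⟨k, hk, hjk, hik⟩
    have : j = k := by omega
    subst this; exact hik
  · intro h; exact ⟨j, hj, by simp, h⟩

theorem pv_posIndex_nonneg (ns : List Int) (id : Int) (i : Int)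
    (hi : i ∈ (pvPosIndex ns).getD id []) : 0 ≤ i := by
  rw [pvPosIndex_getD, pv_mem_enum_filter] at hi
  obtain ⟨k, _, rfl, _⟩ := hi
  positivity

-- writing v at every index of S: pointwise effect
theorem pv_scatter_getElem? (S : List Int) (hS : ∀ i ∈ S, 0 ≤ i) (v : Int)
    (row : List Int) (j : Nat) :
    (S.foldl (fun r i => PySem.List.pySetD r i v) row)[j]? =
      if (j : Int) ∈ S ∧ j < row.length then some v else row[j]? := by
  induction S generalizing row with
  | nil => simp
  | cons i S ih =>
    have hi : (0 : Int) ≤ i := hS i (by simp)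
    simp only [List.foldl_cons]
    rw [PySem.List.pySetD_of_nonneg row v hi,
      ih (fun x hx => hS x (by simp [hx]))]
    simp only [List.length_set, List.getElem?_set, List.mem_cons]
    by_cases hjl : j < row.length
    · by_cases hji : (j : Int) = i
      · have htn : i.toNat = j := by omega
        simp only [htn, if_pos hjl, hji]
        split_ifs <;> (simp_all; try omega)
      · have htn : i.toNat ≠ j := by omega
        rw [if_neg htn]
        by_cases hjS : (j : Int) ∈ S <;> simp [hjS, hji, hjl]
    · rw [List.getElem?_eq_none (by omega)]
      split_ifs <;> (simp_all; try omega)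

theorem pv_scatter_length (S : List Int) (v : Int) (row : List Int) :
    (S.foldl (fun r i => PySem.List.pySetD r i v) row).length = row.length := by
  induction S generalizing row with
  | nil => rfl
  | cons i S ih => simp [List.foldl_cons, ih, PySem.List.length_pySetD]

theorem pv_rowB_length (ns : List Int) (d : List (Int × Int)) (row : List Int) :
    (d.foldl (fun row p =>
      ((pvPosIndex ns).getD p.1 []).foldl (fun r i => PySem.List.pySetD r i p.2) row) row).length
      = row.length := by
  induction d generalizing row with
  | nil => rfl
  | cons p d ih => simp [List.foldl_cons, ih, pv_scatter_length]

-- the scatter loop over a duplicate-free inner dict computes the first-match lookup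
theorem pv_rowB_getElem? (ns : List Int) (d : List (Int × Int))
    (hnd : (d.map (·.1)).Nodup) (row : List Int) (hlen : row.length = ns.length)
    (j : Nat) (hj : j < ns.length) :
    (d.foldl (fun row p =>
      ((pvPosIndex ns).getD p.1 []).foldl (fun r i => PySem.List.pySetD r i p.2) row) row)[j]?
      = match d.find? (fun p => p.1 == ns[j]) with
        | some p => some p.2
        | none => row[j]? := by
  induction d generalizing row with
  | nil => simp
  | cons p d ih =>
    simp only [List.map_cons, List.nodup_cons] at hnd
    obtain ⟨hp, hnd'⟩ := hnd
    simp only [List.foldl_cons]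
    rw [ih hnd' _ (by rw [pv_scatter_length]; exact hlen)]
    rw [List.find?_cons]
    by_cases hkey : p.1 = ns[j]
    · have hbeq : (p.1 == ns[j]) = true := by simpa using hkey
      have hnone : d.find? (fun q => q.1 == ns[j]) = none := by
        rw [List.find?_eq_none]
        intro q hq hbq
        exact hp (by rw [hkey, ← (by simpa using hbq : q.1 = ns[j])]; exact List.mem_map_of_mem hq)
      simp only [hbeq, hnone]
      rw [pv_scatter_getElem? _ (pv_posIndex_nonneg ns p.1) _ _ j]
      rw [if_pos ⟨(pv_mem_posIndex ns p.1 j hj).mpr hkey.symm, by omega⟩]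
    · have hbeq : (p.1 == ns[j]) = false := by simpa using hkey
      simp only [hbeq]
      cases hfind : d.find? (fun q => q.1 == ns[j]) with
      | some q => simp
      | none =>
        simp only []
        rw [pv_scatter_getElem? _ (pv_posIndex_nonneg ns p.1) _ _ j]
        rw [if_neg (by
          rintro ⟨hmem, -⟩
          exact hkey ((pv_mem_posIndex ns p.1 j hj).mp hmem).symm)]

-- A's cell value as a single expression
theorem pv_cell_eq (d : List (Int × Int)) (id : Int) :
    (if !((d.map (·.1)).contains id) then (-1 : Int) else pvLookup d id)
      = match d.find? (fun p => p.1 == id) with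
        | some p => p.2
        | none => -1 := by
  cases hfind : d.find? (fun p => p.1 == id) with
  | some p =>
    have : (d.map (·.1)).contains id = true := by
      have hp := List.mem_of_find?_eq_some hfind
      have hb : p.1 = id := by simpa using (List.find?_some hfind)
      simp only [List.contains_iff_mem]
      exact hb ▸ List.mem_map_of_mem hp
    rw [this]
    simp only [Bool.not_true, Bool.false_eq_true, if_false, pvLookup, hfind,
      Option.map_some, Option.getD_some]
  | none =>
    have hc : (d.map (·.1)).contains id = false := by
      rw [Bool.eq_false_iff]
      intro hc
      simp only [List.contains_iff_mem, List.mem_map] at hc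
      obtain ⟨q, hq, hq1⟩ := hc
      have := List.find?_eq_none.mp hfind q hq
      simp [hq1] at this
    rw [hc]
    simp only [Bool.not_false, if_true]

-- row equality for one year
theorem pv_row_eq (ns : List Int) (d : List (Int × Int)) (hnd : (d.map (·.1)).Nodup) :
    (d.foldl (fun row p =>
      ((pvPosIndex ns).getD p.1 []).foldl (fun r i => PySem.List.pySetD r i p.2) row)
      (List.replicate ns.length (-1 : Int)))
    = ns.foldl (fun y id =>
        if !((d.map (·.1)).contains id) then y ++ [(-1 : Int)]
        else y ++ [pvLookup d id]) [] := by
  have hbr : (fun (y : List Int) id =>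
      if !((d.map (·.1)).contains id) then y ++ [(-1 : Int)] else y ++ [pvLookup d id])
      = (fun y id => y ++ [if !((d.map (·.1)).contains id) then (-1 : Int) else pvLookup d id]) := by
    funext y id; split <;> rfl
  rw [hbr, PySem.List.foldl_append_singleton_eq_map, List.nil_append]
  apply List.ext_getElem?
  intro j
  by_cases hj : j < ns.length
  · rw [pv_rowB_getElem? ns d hnd _ (by simp) j hj]
    rw [List.getElem?_map, List.getElem?_eq_getElem hj]
    simp only [Option.map_some]
    rw [pv_cell_eq]
    cases hfind : d.find? (fun p => p.1 == ns[j]) with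
    | some p => simp
    | none => simp [hj]
  · rw [List.getElem?_eq_none (by rw [pv_rowB_length]; simp; omega),
      List.getElem?_eq_none (by simp; omega)]

-- ===== VERDICT (by name: the statement is the Claim_ definition above) =====
theorem create_tag_list_by_year_spec : Claim_equal_create_tag_list_by_year := by
  intro cl ns _hdom hpre
  unfold Spec_create_tag_list_by_year create_tag_list_by_year create_tag_list_by_year_alt
  simp only []
  rw [PySem.List.foldl_append_singleton_eq_map, PySem.List.foldl_append_singleton_eq_map,
    List.nil_append, List.nil_append]
  apply List.map_congr_left
  intro year _hy
  have hnd : ((pvYearDict cl year).map (·.1)).Nodup := by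
    unfold pvYearDict
    cases hfind : cl.find? (fun p => p.1 == year) with
    | some p => simpa using hpre p (List.mem_of_find?_eq_some hfind)
    | none => simp
  exact (pv_row_eq ns (pvYearDict cl year) hnd).symm
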